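-- pv_equiv track=rewrite | github.com/QUAFFquaff/OBDDetect | OBD_project-master/dataHandler/Algorithm_comparision/mean_shift.py | word2vector
-- ===== SOURCE A (Python) =====
-- normal_events = ['a','h','v','o']
--
-- medium_events = ['b','i','p','w']
--
-- high_events = ['c','j','q','x']
--
-- def word2vector(word):
--     x0,x1,x2 = 0, 0, 0
--     for l in word:
--         if l in normal_events:
--             x0 += 1
--         elif l in medium_events:
--             x1 += 10
--         elif l in high_events:
--             x2 += 20
--     return [x0,x1,x2,len(word)]
-- ===== SOURCE B (Python) =====
-- from collections import Counter
--
-- normal_events = ['a','h','v','o']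
-- medium_events = ['b','i','p','w']
-- high_events = ['c','j','q','x']
--
-- def word2vector(word):
--     c = Counter(word)
--     x0 = sum(c[ch] for ch in normal_events)
--     x1 = 10 * sum(c[ch] for ch in medium_events)
--     x2 = 20 * sum(c[ch] for ch in high_events)
--     return [x0, x1, x2, len(word)]
-- ===== Notes on version B (the rewrite author's own statement) =====
-- stated objective: simpler
-- what changed: Builds a Counter frequency table of the word once, then sums counts per category list and applies the weights as multipliers, instead of a branching elif-chain per character.
import Mathlib
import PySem

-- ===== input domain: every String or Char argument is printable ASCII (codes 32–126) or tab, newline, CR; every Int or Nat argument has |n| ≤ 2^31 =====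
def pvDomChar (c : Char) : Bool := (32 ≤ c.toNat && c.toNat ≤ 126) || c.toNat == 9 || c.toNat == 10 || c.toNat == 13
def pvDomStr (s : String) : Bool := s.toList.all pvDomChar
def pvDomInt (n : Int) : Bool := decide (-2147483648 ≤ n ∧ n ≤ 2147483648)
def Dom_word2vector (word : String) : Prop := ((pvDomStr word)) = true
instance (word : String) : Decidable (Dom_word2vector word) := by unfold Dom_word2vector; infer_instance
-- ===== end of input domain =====

-- B builds a frequency table (Counter) once and sums per-category counts with the weights
-- as multipliers, replacing A's branching per-character elif chain; objective: simpler.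


def normal_events : List Char := ['a','h','v','o']
def medium_events : List Char := ['b','i','p','w']
def high_events : List Char := ['c','j','q','x']

-- ===== PORT A =====
-- the for-loop over the word's characters with state (x0,x1,x2)
def w2vLoop : List Char → Int × Int × Int → Int × Int × Int
  | [], s => s
  | l :: rest, (x0, x1, x2) =>
      if l ∈ normal_events then w2vLoop rest (x0 + 1, x1, x2)
      else if l ∈ medium_events then w2vLoop rest (x0, x1 + 10, x2)
      else if l ∈ high_events then w2vLoop rest (x0, x1, x2 + 20)
      else w2vLoop rest (x0, x1, x2)

def word2vector (word : String) : List Int :=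
  let s := w2vLoop word.toList (0, 0, 0)
  [s.1, s.2.1, s.2.2, (PySem.Str.len word : Int)]

-- ===== PORT B =====
def word2vector_alt (word : String) : List Int :=
  let c := PySem.Dict.counter word.toList
  let x0 := (normal_events.map (fun ch => c.getD ch 0)).sum
  let x1 := 10 * (medium_events.map (fun ch => c.getD ch 0)).sum
  let x2 := 20 * (high_events.map (fun ch => c.getD ch 0)).sum
  [x0, x1, x2, (PySem.Str.len word : Int)]

-- ===== PRECONDITION & SPEC =====
def Spec_word2vector (word : String) (out : List Int) : Prop := out = word2vector_alt word
instance (word : String) (out : List Int) : Decidable (Spec_word2vector word out) := by unfold Spec_word2vector; infer_instance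

-- ===== CLAIM (what is proved, stated in full; the proofs are below) =====
def Claim_equal_word2vector : Prop := ∀ (word : String), Dom_word2vector word → Spec_word2vector word (word2vector word)

-- ===== LEMMAS AND PROOFS =====

-- category sums over a character list
def catSum (cat : List Char) (l : List Char) : Int :=
  (cat.map (fun ch => (l.count ch : Int))).sum

theorem catSum_nil (cat : List Char) : catSum cat [] = 0 := by
  simp [catSum]

theorem catSum_cat_cons (c : Char) (cs : List Char) (w : List Char) :
    catSum (c :: cs) w = (w.count c : Int) + catSum cs w := by
  simp [catSum]

theorem catSum_cons_notmem (cat : List Char) (x : Char) (l : List Char)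
    (hx : x ∉ cat) : catSum cat (x :: l) = catSum cat l := by
  induction cat with
  | nil => simp [catSum]
  | cons c cs ih =>
      have hxc : ¬ x = c := fun he => hx (he ▸ List.mem_cons_self)
      have hxcs : x ∉ cs := fun h => hx (List.mem_cons_of_mem _ h)
      rw [catSum_cat_cons, catSum_cat_cons, ih hxcs, List.count_cons]
      simp [hxc]

theorem catSum_cons_mem (cat : List Char) (hnd : cat.Nodup) (x : Char) (l : List Char)
    (hx : x ∈ cat) : catSum cat (x :: l) = catSum cat l + 1 := by
  induction cat with
  | nil => cases hx
  | cons c cs ih =>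
      rcases List.mem_cons.mp hx with h | h
      · subst h
        have hx' : x ∉ cs := (List.nodup_cons.mp hnd).1
        rw [catSum_cat_cons, catSum_cat_cons, catSum_cons_notmem cs x l hx',
          List.count_cons_self]
        push_cast
        ring
      · have hne : ¬ x = c := by
          rintro rfl; exact (List.nodup_cons.mp hnd).1 h
        rw [catSum_cat_cons, catSum_cat_cons, ih (List.nodup_cons.mp hnd).2 h,
          List.count_cons]
        simp [hne]
        ring

theorem w2vLoop_eq (l : List Char) (x0 x1 x2 : Int) :
    w2vLoop l (x0, x1, x2) =
      (x0 + catSum normal_events l,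
       x1 + 10 * catSum medium_events l,
       x2 + 20 * catSum high_events l) := by
  induction l generalizing x0 x1 x2 with
  | nil => simp [w2vLoop, catSum_nil]
  | cons c rest ih =>
      by_cases h0 : c ∈ normal_events
      · have hm : c ∉ medium_events := by
          simp [normal_events] at h0
          rcases h0 with rfl|rfl|rfl|rfl <;> decide
        have hh : c ∉ high_events := by
          simp [normal_events] at h0
          rcases h0 with rfl|rfl|rfl|rfl <;> decide
        simp only [w2vLoop, if_pos h0, ih,
          catSum_cons_mem normal_events (by decide) c rest h0,
          catSum_cons_notmem medium_events c rest hm,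
          catSum_cons_notmem high_events c rest hh]
        ring_nf
      · by_cases h1 : c ∈ medium_events
        · have hh : c ∉ high_events := by
            simp [medium_events] at h1
            rcases h1 with rfl|rfl|rfl|rfl <;> decide
          simp only [w2vLoop, if_neg h0, if_pos h1, ih,
            catSum_cons_notmem normal_events c rest h0,
            catSum_cons_mem medium_events (by decide) c rest h1,
            catSum_cons_notmem high_events c rest hh]
          ring_nf
        · by_cases h2 : c ∈ high_events
          · simp only [w2vLoop, if_neg h0, if_neg h1, if_pos h2, ih,
              catSum_cons_notmem normal_events c rest h0,
              catSum_cons_notmem medium_events c rest h1,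
              catSum_cons_mem high_events (by decide) c rest h2]
            ring_nf
          · simp only [w2vLoop, if_neg h0, if_neg h1, if_neg h2, ih,
              catSum_cons_notmem normal_events c rest h0,
              catSum_cons_notmem medium_events c rest h1,
              catSum_cons_notmem high_events c rest h2]

-- ===== VERDICT (by name: the statement is the Claim_ definition above) =====
theorem word2vector_spec : Claim_equal_word2vector := by
  intro word _
  unfold Spec_word2vector word2vector word2vector_alt
  simp only [w2vLoop_eq, PySem.Dict.getD_counter, catSum, zero_add]
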